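-- pv_equiv track=rewrite | github.com/EnesSakalliUniWien/BranchArchitect | brancharchitect/leaforder/anchor_order.py | _boundary_between_anchor_blocks
-- ===== SOURCE A (Python) =====
-- from typing import Dict, Tuple, Optional, List
--
-- def _boundary_between_anchor_blocks(
--     order: List[str], key_map: Dict[str, Tuple[int, int, int]]
-- ) -> int:
--     """Find boundary index between different anchor blocks in circular ordering.
--
--     Searches for an adjacency i | i+1 where both taxa are anchors (band=1)
--     but belong to different blocks (different anchor_pos).
--
--     Args:
--         order: Ordered list of taxa names
--         key_map: Mapping from taxon to sort key tuple (band, anchor_pos, within_block_pos)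
--
--     Returns:
--         Index where the cut should be made (0 if no suitable boundary found)
--     """
--     n = len(order)
--     if n == 0:
--         return 0
--     for i in range(n):
--         a = order[i]
--         b = order[(i + 1) % n]
--         band_a, anchor_pos_a, _ = key_map[a]
--         band_b, anchor_pos_b, _ = key_map[b]
--         if band_a == 1 and band_b == 1 and anchor_pos_a != anchor_pos_b:
--             return (i + 1) % n
--     # Fallback: cut at a band change
--     for i in range(n):
--         a = order[i]
--         b = order[(i + 1) % n]
--         if key_map[a][0] != key_map[b][0]:
--             return (i + 1) % n
--     return 0
-- ===== SOURCE B (Python) =====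
-- from typing import Dict, Tuple, List
--
-- def _boundary_between_anchor_blocks(
--     order: List[str], key_map: Dict[str, Tuple[int, int, int]]
-- ) -> int:
--     """Single pass: look up each taxon's key once, pair it with its circular
--     successor, return the first anchor-block boundary immediately and remember
--     the first band change as a fallback."""
--     n = len(order)
--     keys = [key_map[t] for t in order]
--     nxt = keys[1:] + keys[:1]
--     fallback = None
--     for i, ((band_a, pos_a, _), (band_b, pos_b, _)) in enumerate(zip(keys, nxt)):
--         if band_a == 1 == band_b and pos_a != pos_b:
--             return (i + 1) % n
--         if fallback is None and band_a != band_b: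
--             fallback = (i + 1) % n
--     return fallback if fallback is not None else 0
-- ===== Notes on version B (the rewrite author's own statement) =====
-- stated objective: simpler
-- what changed: Replaces A's two sequential circular scans (each re-doing the dict lookups) by one precomputed key list paired with its circular rotation and a single pass that returns an anchor-block boundary immediately while remembering the first band change as a fallback.
import Mathlib
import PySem

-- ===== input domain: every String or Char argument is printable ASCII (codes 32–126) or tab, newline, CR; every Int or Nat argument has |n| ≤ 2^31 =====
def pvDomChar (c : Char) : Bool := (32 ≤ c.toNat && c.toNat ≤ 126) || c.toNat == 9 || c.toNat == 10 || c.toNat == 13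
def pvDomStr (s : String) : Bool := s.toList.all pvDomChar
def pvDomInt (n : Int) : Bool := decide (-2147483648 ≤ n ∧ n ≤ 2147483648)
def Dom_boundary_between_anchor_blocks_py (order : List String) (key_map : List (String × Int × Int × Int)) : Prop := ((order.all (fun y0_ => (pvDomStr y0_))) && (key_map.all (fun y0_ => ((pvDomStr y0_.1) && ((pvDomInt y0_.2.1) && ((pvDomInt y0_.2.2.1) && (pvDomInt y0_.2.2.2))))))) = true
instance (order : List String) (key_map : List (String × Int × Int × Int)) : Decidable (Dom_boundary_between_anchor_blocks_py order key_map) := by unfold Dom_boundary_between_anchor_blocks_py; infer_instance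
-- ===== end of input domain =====

-- B replaces A's two sequential circular scans by one pass that looks each key up once,
-- returns the anchor-block boundary immediately and keeps the first band change as a fallback (objective: simpler).

-- ===== PORT A =====
-- key_map[a] raises KeyError on a missing taxon; Pre_ excludes that, so getD's default is never used inside Pre_.
def pvA_scan1 (order : List String) (km : List (String × Int × Int × Int)) (n : Int) : List Int → Option Int
  | [] => none
  | i :: rest =>
    let a := PySem.List.pyGetD order i ""
    let b := PySem.List.pyGetD order (PySem.Int.mod (i + 1) n) ""
    let ka := PySem.Dict.getD ⟨km⟩ a ((0:Int), (0:Int), (0:Int))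
    let kb := PySem.Dict.getD ⟨km⟩ b ((0:Int), (0:Int), (0:Int))
    if ka.1 = 1 ∧ kb.1 = 1 ∧ ka.2.1 ≠ kb.2.1 then some (PySem.Int.mod (i + 1) n)
    else pvA_scan1 order km n rest

def pvA_scan2 (order : List String) (km : List (String × Int × Int × Int)) (n : Int) : List Int → Option Int
  | [] => none
  | i :: rest =>
    let a := PySem.List.pyGetD order i ""
    let b := PySem.List.pyGetD order (PySem.Int.mod (i + 1) n) ""
    if (PySem.Dict.getD ⟨km⟩ a ((0:Int), (0:Int), (0:Int))).1 ≠ (PySem.Dict.getD ⟨km⟩ b ((0:Int), (0:Int), (0:Int))).1 then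
      some (PySem.Int.mod (i + 1) n)
    else pvA_scan2 order km n rest

def boundary_between_anchor_blocks_py (order : List String) (key_map : List (String × Int × Int × Int)) : Int :=
  let n : Int := PySem.List.len order
  if n = 0 then 0
  else
    match pvA_scan1 order key_map n (PySem.List.pyRange 0 n) with
    | some r => r
    | none =>
      match pvA_scan2 order key_map n (PySem.List.pyRange 0 n) with
      | some r => r
      | none => 0

-- ===== PORT B =====
def pvB_loop (n : Int) : List (Int × (Int × Int × Int) × (Int × Int × Int)) → Option Int → Int
  | [], fb => fb.getD 0
  | (i, ka, kb) :: rest, fb =>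
    if ka.1 = 1 ∧ kb.1 = 1 ∧ ka.2.1 ≠ kb.2.1 then PySem.Int.mod (i + 1) n
    else pvB_loop n rest (if fb = none ∧ ka.1 ≠ kb.1 then some (PySem.Int.mod (i + 1) n) else fb)

def boundary_between_anchor_blocks_py_alt (order : List String) (key_map : List (String × Int × Int × Int)) : Int :=
  let n : Int := PySem.List.len order
  let keys := order.map (fun t => PySem.Dict.getD ⟨key_map⟩ t ((0:Int), (0:Int), (0:Int)))
  let nxt := PySem.List.slice keys (some 1) none ++ PySem.List.slice keys none (some 1)
  pvB_loop n (PySem.List.enumerate (keys.zip nxt)) none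

-- ===== PRECONDITION & SPEC =====
-- Pre_ excludes only inputs where some taxon of `order` is missing from key_map: there Python A raises KeyError.
def Pre_boundary_between_anchor_blocks_py (order : List String) (key_map : List (String × Int × Int × Int)) : Prop :=
  ∀ t ∈ order, t ∈ key_map.map Prod.fst
instance (order : List String) (key_map : List (String × Int × Int × Int)) : Decidable (Pre_boundary_between_anchor_blocks_py order key_map) := by unfold Pre_boundary_between_anchor_blocks_py; infer_instance

def pvWitness_boundary_between_anchor_blocks_py : List String × (List (String × Int × Int × Int)) :=
  (["a", "b", "c"], [("a", 1, 0, 0), ("b", 1, 1, 0), ("c", 0, 0, 0)])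

def Spec_boundary_between_anchor_blocks_py (order : List String) (key_map : List (String × Int × Int × Int)) (out : Int) : Prop := out = boundary_between_anchor_blocks_py_alt order key_map
instance (order : List String) (key_map : List (String × Int × Int × Int)) (out : Int) : Decidable (Spec_boundary_between_anchor_blocks_py order key_map out) := by unfold Spec_boundary_between_anchor_blocks_py; infer_instance

-- ===== CLAIM (what is proved, stated in full; the proofs are below) =====
def Claim_equal_boundary_between_anchor_blocks_py : Prop := ∀ (order : List String) (key_map : List (String × Int × Int × Int)), Dom_boundary_between_anchor_blocks_py order key_map → Pre_boundary_between_anchor_blocks_py order key_map → Spec_boundary_between_anchor_blocks_py order key_map (boundary_between_anchor_blocks_py order key_map)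

-- ===== LEMMAS AND PROOFS =====

-- the key (band, anchor_pos, within) A reads for circular position i
def pvG (order : List String) (km : List (String × Int × Int × Int)) (i : Int) : Int × Int × Int :=
  PySem.Dict.getD ⟨km⟩ (PySem.List.pyGetD order i "") ((0:Int), (0:Int), (0:Int))

-- B's single pass with a fallback accumulator = A's priority scan, then the accumulator, then A's fallback scan
theorem pvB_loop_eq (order : List String) (km : List (String × Int × Int × Int)) (n : Int)
    (l : List Int) (fb : Option Int) :
    pvB_loop n (l.map (fun i => (i, pvG order km i, pvG order km (PySem.Int.mod (i + 1) n)))) fb =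
      match pvA_scan1 order km n l with
      | some v => v
      | none =>
        match fb with
        | some f => f
        | none => (pvA_scan2 order km n l).getD 0 := by
  induction l generalizing fb with
  | nil => cases fb <;> simp [pvB_loop, pvA_scan1, pvA_scan2]
  | cons i rest ih =>
    simp only [pvG] at ih
    simp only [List.map_cons, pvB_loop, pvA_scan1, pvA_scan2, pvG]
    by_cases h1 : (PySem.Dict.getD ⟨km⟩ (PySem.List.pyGetD order i "") ((0:Int), (0:Int), (0:Int))).1 = 1 ∧
        (PySem.Dict.getD ⟨km⟩ (PySem.List.pyGetD order (PySem.Int.mod (i + 1) n) "") ((0:Int), (0:Int), (0:Int))).1 = 1 ∧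
        (PySem.Dict.getD ⟨km⟩ (PySem.List.pyGetD order i "") ((0:Int), (0:Int), (0:Int))).2.1 ≠
          (PySem.Dict.getD ⟨km⟩ (PySem.List.pyGetD order (PySem.Int.mod (i + 1) n) "") ((0:Int), (0:Int), (0:Int))).2.1
    · simp [h1]
    · simp only [if_neg h1, ih]
      cases fb with
      | some f => simp
      | none =>
        by_cases h2 : (PySem.Dict.getD ⟨km⟩ (PySem.List.pyGetD order i "") ((0:Int), (0:Int), (0:Int))).1 ≠
            (PySem.Dict.getD ⟨km⟩ (PySem.List.pyGetD order (PySem.Int.mod (i + 1) n) "") ((0:Int), (0:Int), (0:Int))).1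
        · simp [h2]
        · simp [h2]

-- the enumerated zip of keys with their circular successors is exactly the per-index data of A's scans
theorem pvEnum_eq (order : List String) (km : List (String × Int × Int × Int)) :
    PySem.List.enumerate
        ((order.map (fun t => PySem.Dict.getD ⟨km⟩ t ((0:Int), (0:Int), (0:Int)))).zip
          (PySem.List.slice (order.map (fun t => PySem.Dict.getD ⟨km⟩ t ((0:Int), (0:Int), (0:Int)))) (some 1) none ++
            PySem.List.slice (order.map (fun t => PySem.Dict.getD ⟨km⟩ t ((0:Int), (0:Int), (0:Int)))) none (some 1))) =
      (PySem.List.pyRange 0 (PySem.List.len order)).map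
        (fun i => (i, pvG order km i, pvG order km (PySem.Int.mod (i + 1) (PySem.List.len order)))) := by
  rcases order.eq_nil_or_concat' with rfl | ⟨o, t, rfl⟩
  · simp [PySem.List.len, PySem.List.pyRange]
  · set order := o ++ [t] with horder
    have hne : order ≠ [] := by simp [horder]
    set keys := order.map (fun t => PySem.Dict.getD ⟨km⟩ t ((0:Int), (0:Int), (0:Int))) with hkeys
    have hkn : keys.length = order.length := by simp [hkeys]
    have hkpos : 0 < keys.length := by
      rw [hkn]; exact List.length_pos_of_ne_nil hne
    have hslice1 : PySem.List.slice keys (some 1) none = keys.tail := PySem.List.slice_from_one keys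
    have hslice2 : PySem.List.slice keys none (some 1) = keys.take 1 := by
      rw [PySem.List.slice_to keys (by norm_num)]; norm_num
    rw [hslice1, hslice2]
    have hnxtlen : (keys.tail ++ keys.take 1).length = keys.length := by
      simp; omega
    have hziplen : (keys.zip (keys.tail ++ keys.take 1)).length = order.length := by
      rw [List.length_zip, hnxtlen, hkn]; omega
    rw [PySem.List.enumerate_eq_map_pyRange _ (((0:Int), (0:Int), (0:Int)), ((0:Int), (0:Int), (0:Int)))]
    have hlen : PySem.List.len (keys.zip (keys.tail ++ keys.take 1)) = PySem.List.len order := by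
      simp [PySem.List.len, hziplen]
    rw [hlen]
    apply List.map_congr_left
    intro j hj
    rw [PySem.List.mem_pyRange_one] at hj
    obtain ⟨hj0, hjn⟩ := hj
    have hjlt : j.toNat < order.length := by
      simp [PySem.List.len] at hjn; omega
    have hjz : (j.toNat : Int) = j := Int.toNat_of_nonneg hj0
    have hget : ∀ (k : Nat) (hk : k < order.length),
        keys[k]'(by rw [hkn]; exact hk) = pvG order km (k : Int) := by
      intro k hk
      rw [pvG, PySem.List.pyGetD_eq_getElem order "" (by positivity) (by exact_mod_cast hk)]
      simp [hkeys]
    have hzj : PySem.List.pyGetD (keys.zip (keys.tail ++ keys.take 1)) j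
        (((0:Int), (0:Int), (0:Int)), ((0:Int), (0:Int), (0:Int))) =
        (keys.zip (keys.tail ++ keys.take 1))[j.toNat]'(by rw [hziplen]; exact hjlt) := by
      apply PySem.List.pyGetD_eq_getElem _ _ hj0
      rw [hziplen]; omega
    rw [hzj, List.getElem_zip]
    refine Prod.ext rfl (Prod.ext ?_ ?_) <;> simp only
    · rw [hget j.toNat hjlt, hjz]
    · rw [List.getElem_append]
      split_ifs with hcase
      · -- j.toNat < keys.tail.length, i.e. j + 1 < n
        rw [List.getElem_tail]
        have hlt : j.toNat + 1 < order.length := by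
          simp at hcase; omega
        rw [hget (j.toNat + 1) hlt]
        have hmod : PySem.Int.mod (j + 1) (PySem.List.len order) = j + 1 := by
          rw [PySem.Int.mod_eq_emod_of_pos (by simp [PySem.List.len]; omega)]
          apply Int.emod_eq_of_lt (by omega)
          simp [PySem.List.len]; omega
        rw [hmod]
        congr 1
        omega
      · -- j.toNat = n - 1
        have hjeq : j.toNat = order.length - 1 := by
          simp at hcase; simp [PySem.List.len] at hjn; omega
        have h0lt : 0 < order.length := by omega
        rw [List.getElem_take]
        have hmod : PySem.Int.mod (j + 1) (PySem.List.len order) = 0 := by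
          have : j + 1 = PySem.List.len order := by
            simp [PySem.List.len]; omega
          rw [this, PySem.Int.mod_eq_emod_of_pos (by simp [PySem.List.len]; omega), Int.emod_self]
        rw [hmod]
        have := hget 0 h0lt
        simp only [Int.natCast_zero] at this
        convert this using 2
        simp at hcase ⊢
        omega

-- ===== VERDICT (by name: the statement is the Claim_ definition above) =====
theorem boundary_between_anchor_blocks_py_spec : Claim_equal_boundary_between_anchor_blocks_py := by
  intro order km _ _
  unfold Spec_boundary_between_anchor_blocks_py
  simp only [boundary_between_anchor_blocks_py, boundary_between_anchor_blocks_py_alt]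
  rw [pvEnum_eq order km, pvB_loop_eq order km]
  by_cases h0 : (PySem.List.len order) = 0
  · have : order = [] := by
      simpa [PySem.List.len] using h0
    subst this
    simp [pvA_scan1, pvA_scan2, PySem.List.len, PySem.List.pyRange]
  · simp only [if_neg h0]
    cases pvA_scan1 order km (PySem.List.len order) (PySem.List.pyRange 0 (PySem.List.len order)) with
    | some v => simp
    | none =>
      cases h2 : pvA_scan2 order km (PySem.List.len order) (PySem.List.pyRange 0 (PySem.List.len order)) with
      | some v => simp
      | none => simp
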